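-- pv_equiv track=rewrite | github.com/gportella/codewars_challenges | circular_genome_assembly/genome_assembly_debruijn.py | trim_circular
-- ===== SOURCE A (Python) =====
-- def trim_circular(sequence: str) -> str:
--     """Remove circular duplication from sequence using KMP."""
--     n = len(sequence)
--     if n == 0:
--         return sequence
--
--     pi = [0] * n
--     j = 0
--     for i in range(1, n):
--         while j > 0 and sequence[i] != sequence[j]:
--             j = pi[j - 1]
--         if sequence[i] == sequence[j]:
--             j += 1
--         pi[i] = j
--
--     border = pi[-1]
--     if 0 < border < n:
--         return sequence[:-border]
--     return sequence
-- ===== SOURCE B (Python) =====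
-- def trim_circular(sequence: str) -> str:
--     """Remove circular duplication: cut off the longest proper border (direct search)."""
--     n = len(sequence)
--     for k in range(n - 1, 0, -1):
--         if sequence[:k] == sequence[n - k:]:
--             return sequence[:-k]
--     return sequence
-- ===== Notes on version B (the rewrite author's own statement) =====
-- stated objective: simpler
-- what changed: Replaces the KMP prefix-function table with a direct downward search for the longest proper border (compare prefix with suffix for k = n-1 down to 1), so no pi table or incremental while-loop state is kept.
import Mathlib
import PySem

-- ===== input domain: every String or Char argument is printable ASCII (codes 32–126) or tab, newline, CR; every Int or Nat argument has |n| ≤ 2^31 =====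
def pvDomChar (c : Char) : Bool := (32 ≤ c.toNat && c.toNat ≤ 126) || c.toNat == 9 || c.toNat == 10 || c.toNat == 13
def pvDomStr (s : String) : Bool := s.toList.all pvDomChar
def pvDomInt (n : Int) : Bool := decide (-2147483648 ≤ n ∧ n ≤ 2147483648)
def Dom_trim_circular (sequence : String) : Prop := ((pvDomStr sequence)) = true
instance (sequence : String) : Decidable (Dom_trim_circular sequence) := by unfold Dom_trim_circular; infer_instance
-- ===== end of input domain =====

-- B replaces A's KMP prefix-function table by a direct downward search for the longest
-- proper border (simpler, no table); proved to return the same string on every input.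

-- ===== PORT A =====
-- inner `while j > 0 and sequence[i] != sequence[j]: j = pi[j-1]`; fuel only makes the
-- loop total (called with fuel = j, enough since pi[j-1] < j); getD indices are always in range.
def piWhile (s : List Char) (pi : List Nat) (c : Char) : Nat → Nat → Nat
  | j, 0 => j
  | j, fuel+1 => if 0 < j ∧ c ≠ s.getD j ' ' then piWhile s pi c (pi.getD (j-1) 0) fuel else j

-- body of `for i in range(1, n)`: state = (pi, j)
def kmpStep (s : List Char) (st : List Nat × Nat) (i : Nat) : List Nat × Nat :=
  let j := piWhile s st.1 (s.getD i ' ') st.2 st.2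
  let j := if s.getD i ' ' = s.getD j ' ' then j + 1 else j
  (st.1.set i j, j)

def trim_circular (sequence : String) : String :=
  let s := sequence.toList
  let n := s.length
  if n = 0 then sequence
  else
    let st := (List.range' 1 (n-1)).foldl (kmpStep s) (List.replicate n 0, 0)
    let border := (PySem.List.pyGet? st.1 (-1)).getD 0   -- pi[-1]; pi is nonempty here
    if 0 < border ∧ border < n then String.mk (PySem.List.slice s none (some (-(border:Int))))
    else sequence

-- ===== PORT B =====
-- `for k in range(n-1, 0, -1): if sequence[:k] == sequence[n-k:] : return sequence[:-k]`
-- slices are exact here: 0 < k ≤ n-1, so sequence[:k] = take k, sequence[n-k:] = drop (n-k)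
def findDown (s : List Char) (n : Nat) : Nat → Option Nat
  | 0 => none
  | k+1 => if s.take (k+1) = s.drop (n - (k+1)) then some (k+1) else findDown s n k

def trim_circular_alt (sequence : String) : String :=
  let s := sequence.toList
  let n := s.length
  match findDown s n (n-1) with
  | some k => String.mk (PySem.List.slice s none (some (-(k:Int))))
  | none => sequence

-- ===== PRECONDITION & SPEC =====
def Spec_trim_circular (sequence : String) (out : String) : Prop := out = trim_circular_alt sequence
instance (sequence : String) (out : String) : Decidable (Spec_trim_circular sequence out) := by unfold Spec_trim_circular; infer_instance

-- ===== CLAIM (what is proved, stated in full; the proofs are below) =====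
def Claim_equal_trim_circular : Prop := ∀ (sequence : String), Dom_trim_circular sequence → Spec_trim_circular sequence (trim_circular sequence)

-- ===== LEMMAS AND PROOFS =====

-- k is (the length of) a proper border of t
def Brd (t : List Char) (k : Nat) : Prop := k < t.length ∧ t.take k = t.drop (t.length - k)

-- longest proper border, by downward search (proof-side specification function)
def mBAux (t : List Char) : Nat → Nat
  | 0 => 0
  | k+1 => if t.take (k+1) = t.drop (t.length - (k+1)) then k+1 else mBAux t k

def mB (t : List Char) : Nat := mBAux t (t.length - 1)

theorem brd_zero (t : List Char) (h : 0 < t.length) : Brd t 0 := by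
  constructor
  · exact h
  · simp

theorem mBAux_le (t : List Char) : ∀ k, mBAux t k ≤ k := by
  intro k
  induction k with
  | zero => simp [mBAux]
  | succ k ih => simp only [mBAux]; split <;> omega

theorem mBAux_brd (t : List Char) (h : 0 < t.length) :
    ∀ k, k < t.length → Brd t (mBAux t k) := by
  intro k hk
  induction k with
  | zero => simpa [mBAux] using brd_zero t h
  | succ k ih =>
    simp only [mBAux]
    split
    · exact ⟨hk, by assumption⟩
    · exact ih (by omega)

theorem mBAux_max (t : List Char) : ∀ k m, m ≤ k → Brd t m → m ≤ mBAux t k := by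
  intro k
  induction k with
  | zero => intro m hm _; omega
  | succ k ih =>
    intro m hm hb
    simp only [mBAux]
    split
    · omega
    · rcases Nat.lt_or_ge m (k+1) with h | h
      · exact ih m (by omega) hb
      · exfalso
        have : m = k+1 := by omega
        subst this
        exact (by assumption : ¬ _) hb.2

theorem mB_lt (t : List Char) (h : 0 < t.length) : mB t < t.length := by
  have := mBAux_le t (t.length - 1)
  unfold mB; omega

theorem mB_brd (t : List Char) (h : 0 < t.length) : Brd t (mB t) :=
  mBAux_brd t h _ (by omega)

theorem mB_max (t : List Char) {m : Nat} (hb : Brd t m) : m ≤ mB t :=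
  mBAux_max t _ m (by have := hb.1; omega) hb

theorem mB_eq (t : List Char) (h : 0 < t.length) {j : Nat} (hb : Brd t j)
    (hmax : ∀ k, Brd t k → k ≤ j) : mB t = j :=
  Nat.le_antisymm (hmax _ (mB_brd t h)) (mB_max t hb)

theorem getD_take {s : List Char} {i k : Nat} (h : k < i) (hk : k < s.length) (d : Char) :
    (s.take i).getD k d = s.getD k d := by
  rw [List.getD_eq_getElem _ _ (by simp; omega), List.getD_eq_getElem _ _ hk]
  simp [List.getElem_take]

theorem take_succ_getD {s : List Char} {i : Nat} (h : i < s.length) :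
    s.take (i+1) = s.take i ++ [s.getD i ' '] := by
  rw [List.take_succ, List.getD_eq_getElem _ _ h]
  simp [List.getElem?_eq_getElem h]

theorem brd_snoc (t : List Char) (c : Char) (j : Nat) :
    Brd (t ++ [c]) (j+1) ↔ Brd t j ∧ t.getD j ' ' = c := by
  have hL : (t ++ [c]).length = t.length + 1 := by simp
  constructor
  · rintro ⟨h1, h2⟩
    rw [hL] at h1
    have hj : j < t.length := by omega
    rw [hL, List.take_append_of_le_length (by omega),
        show t.length + 1 - (j+1) = t.length - j by omega,
        List.drop_append_of_le_length (by omega), take_succ_getD hj] at h2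
    have hlen : (t.take j).length = (t.drop (t.length - j)).length := by simp; omega
    obtain ⟨e1, e2⟩ := List.append_inj h2 (by simpa using hlen)
    refine ⟨⟨hj, e1⟩, by simpa using e2⟩
  · rintro ⟨⟨hj, he⟩, hc⟩
    refine ⟨by rw [hL]; omega, ?_⟩
    rw [hL, List.take_append_of_le_length (by omega),
        show t.length + 1 - (j+1) = t.length - j by omega,
        List.drop_append_of_le_length (by omega),
        take_succ_getD hj, he, hc]

theorem chain_down {t : List Char} {j k : Nat} (hj : Brd t j) (hk : Brd t k) (h : k < j) :
    Brd (t.take j) k := by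
  obtain ⟨hj1, hj2⟩ := hj
  obtain ⟨hk1, hk2⟩ := hk
  have hl : (t.take j).length = j := by simp; omega
  refine ⟨by omega, ?_⟩
  rw [hl, List.take_take, Nat.min_eq_left (by omega), hj2, List.drop_drop,
      show t.length - j + (j - k) = t.length - k by omega]
  exact hk2

theorem chain_up {t : List Char} {j k : Nat} (hj : Brd t j) (hk : Brd (t.take j) k) :
    Brd t k := by
  obtain ⟨hj1, hj2⟩ := hj
  obtain ⟨hk1, hk2⟩ := hk
  simp only [List.length_take] at hk1
  have hkj : k < j := by omega
  have hl : (t.take j).length = j := by simp; omega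
  rw [hl] at hk2
  refine ⟨by omega, ?_⟩
  calc t.take k = (t.take j).take k := by rw [List.take_take, Nat.min_eq_left (by omega)]
    _ = (t.take j).drop (j - k) := hk2
    _ = (t.drop (t.length - j)).drop (j - k) := by rw [hj2]
    _ = t.drop (t.length - k) := by rw [List.drop_drop]; congr 1; omega

theorem piWhile_spec (s : List Char) (pi : List Nat) (c : Char) (i : Nat) (hi : i ≤ s.length)
    (hpi : ∀ k, k < i → pi.getD k 0 = mB (s.take (k+1))) :
    ∀ fuel j, j ≤ fuel → Brd (s.take i) j →
      (∀ k, Brd (s.take i) k → s.getD k ' ' = c → k ≤ j) →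
      Brd (s.take i) (piWhile s pi c j fuel) ∧
      (∀ k, Brd (s.take i) k → s.getD k ' ' = c → k ≤ piWhile s pi c j fuel) ∧
      (piWhile s pi c j fuel = 0 ∨ c = s.getD (piWhile s pi c j fuel) ' ') := by
  intro fuel
  induction fuel with
  | zero =>
    intro j hle hb hmax
    have : j = 0 := by omega
    subst this
    exact ⟨hb, hmax, Or.inl rfl⟩
  | succ fuel ih =>
    intro j hle hb hmax
    have hlt : (s.take i).length = i := by simp; omega
    simp only [piWhile]
    split
    · rename_i hcond
      obtain ⟨hj0, hne⟩ := hcond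
      have hji : j < i := by have := hb.1; omega
      have hgd : pi.getD (j-1) 0 = mB (s.take j) := by
        have := hpi (j-1) (by omega)
        rwa [show j - 1 + 1 = j by omega] at this
      have htj : (s.take i).take j = s.take j := by
        rw [List.take_take, Nat.min_eq_left (by omega)]
      have hjlen : (s.take j).length = j := by simp; omega
      have hjpos : 0 < (s.take j).length := by omega
      have hb' : Brd (s.take i) (pi.getD (j-1) 0) := by
        rw [hgd]
        exact chain_up hb (by rw [htj]; exact mB_brd _ hjpos)
      have hmax' : ∀ k, Brd (s.take i) k → s.getD k ' ' = c → k ≤ pi.getD (j-1) 0 := by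
        intro k hk hck
        have hkj : k ≤ j := hmax k hk hck
        have : k ≠ j := by
          intro h; subst h; exact hne hck.symm
        rw [hgd]
        have := chain_down hb hk (by omega)
        rw [htj] at this
        exact mB_max _ this
      have hfu : pi.getD (j-1) 0 ≤ fuel := by
        rw [hgd]
        have := mB_lt (s.take j) hjpos
        omega
      exact ih _ hfu hb' hmax'
    · rename_i hcond
      refine ⟨hb, hmax, ?_⟩
      by_cases hj : j = 0
      · exact Or.inl hj
      · refine Or.inr (by_contra fun hne => hcond ⟨by omega, fun h => hne h⟩)

theorem step_spec (s : List Char) (pi : List Nat) (j i : Nat)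
    (hi1 : 1 ≤ i) (hi2 : i < s.length)
    (hpi : ∀ k, k < i → pi.getD k 0 = mB (s.take (k+1)))
    (hj : j = mB (s.take i)) :
    (if s.getD i ' ' = s.getD (piWhile s pi (s.getD i ' ') j j) ' '
     then piWhile s pi (s.getD i ' ') j j + 1
     else piWhile s pi (s.getD i ' ') j j) = mB (s.take (i+1)) := by
  set c := s.getD i ' ' with hc
  have hlt : (s.take i).length = i := by simp; omega
  have hpos : 0 < (s.take i).length := by omega
  have hb0 : Brd (s.take i) j := hj ▸ mB_brd _ hpos
  have hmax0 : ∀ k, Brd (s.take i) k → s.getD k ' ' = c → k ≤ j := by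
    intro k hk _; exact hj ▸ mB_max _ hk
  obtain ⟨hbr, hmaxr, hend⟩ := piWhile_spec s pi c i (by omega) hpi j j le_rfl hb0 hmax0
  set r := piWhile s pi c j j with hr
  have hsucc : s.take (i+1) = s.take i ++ [c] := take_succ_getD hi2
  have hlen' : 0 < (s.take (i+1)).length := by simp; omega
  have hri : r < i := by have := hbr.1; omega
  have hgd : (s.take i).getD r ' ' = s.getD r ' ' := getD_take hri (by omega) ' '
  split
  · rename_i hceq
    -- s[i] == s[r]: result r+1 is the longest border of s.take (i+1)
    refine (mB_eq _ hlen' ?_ ?_).symm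
    · rw [hsucc, brd_snoc]
      exact ⟨hbr, by rw [hgd, hceq]⟩
    · intro m hm
      match m with
      | 0 => omega
      | k+1 =>
        rw [hsucc, brd_snoc] at hm
        obtain ⟨hk, hkc⟩ := hm
        have hki : k < i := by have := hk.1; omega
        have := hmaxr k hk (by rw [← getD_take hki (by omega) ' ', hkc])
        omega
  · rename_i hcne
    -- s[i] != s[r]: then r = 0 and s.take (i+1) has no positive border
    have hr0 : r = 0 := by
      rcases hend with h | h
      · exact h
      · exact absurd h hcne
    rw [hr0]
    refine (mB_eq _ hlen' (brd_zero _ hlen') ?_).symm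
    intro m hm
    match m with
    | 0 => omega
    | k+1 =>
      rw [hsucc, brd_snoc] at hm
      obtain ⟨hk, hkc⟩ := hm
      have hki : k < i := by have := hk.1; omega
      have hk0 : k = 0 := by
        have := hmaxr k hk (by rw [← getD_take hki (by omega) ' ', hkc])
        omega
      subst hk0
      exact absurd (by rw [hr0, ← hkc, getD_take (by omega) (by omega)]) hcne

theorem getD_set_self {l : List Nat} {i : Nat} {v d : Nat} (h : i < l.length) :
    (l.set i v).getD i d = v := by
  rw [List.getD_eq_getElem _ _ (by simpa using h)]
  simp

theorem getD_set_ne {l : List Nat} {i k : Nat} {v d : Nat} (h : k ≠ i) :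
    (l.set i v).getD k d = l.getD k d := by
  simp [List.getD, List.getElem?_set_ne (by omega : i ≠ k)]

theorem fold_inv (s : List Char) (n : Nat) (hn : n = s.length) (h0 : 0 < n) :
    ∀ m, m < n →
      ((List.range' 1 m).foldl (kmpStep s) (List.replicate n 0, 0)).1.length = n ∧
      ((List.range' 1 m).foldl (kmpStep s) (List.replicate n 0, 0)).2 = mB (s.take (m+1)) ∧
      (∀ k, k < m+1 →
        ((List.range' 1 m).foldl (kmpStep s) (List.replicate n 0, 0)).1.getD k 0 = mB (s.take (k+1))) := by
  intro m
  induction m with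
  | zero =>
    intro _
    have h1 : mB (s.take 1) = 0 := by
      unfold mB
      have : (s.take 1).length = 1 := by simp; omega
      rw [this]
      simp [mBAux]
    refine ⟨by simp, by simpa using h1.symm, ?_⟩
    intro k hk
    have : k = 0 := by omega
    subst this
    simp [List.getD, h0, h1]
  | succ m ih =>
    intro hm
    obtain ⟨il, ij, ig⟩ := ih (by omega)
    rw [List.range'_1_concat, show 1 + m = m + 1 from Nat.add_comm 1 m, List.foldl_append]
    set st := (List.range' 1 m).foldl (kmpStep s) (List.replicate n 0, 0) with hst
    simp only [List.foldl_cons, List.foldl_nil]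
    have hstep := step_spec s st.1 st.2 (m + 1) (by omega) (by omega)
      (fun k hk => ig k (by omega)) (by rw [ij])
    unfold kmpStep
    simp only []
    refine ⟨by simpa using il, hstep, ?_⟩
    intro k hk
    by_cases hkm : k = m + 1
    · subst hkm
      rw [getD_set_self (by omega)]
      exact hstep
    · rw [getD_set_ne hkm]
      exact ig k (by omega)

theorem findDown_eq (s : List Char) : ∀ k,
    findDown s s.length k = if mBAux s k = 0 then none else some (mBAux s k) := by
  intro k
  induction k with
  | zero => simp [findDown, mBAux]
  | succ k ih =>
    simp only [findDown, mBAux]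
    split
    · simp
    · exact ih

-- ===== VERDICT (by name: the statement is the Claim_ definition above) =====
theorem trim_circular_spec : Claim_equal_trim_circular := by
  intro sequence _
  show trim_circular sequence = trim_circular_alt sequence
  have hB0 : ∀ L, L - 1 = 0 → (match findDown sequence.toList L (L - 1) with
      | some k => String.mk (PySem.List.slice sequence.toList none (some (-(k:Int))))
      | none => sequence) = sequence := by
    intro L hL
    rw [hL]
    rfl
  unfold trim_circular trim_circular_alt
  by_cases h0 : sequence.toList.length = 0
  · show (if sequence.toList.length = 0 then sequence else _) = _
    rw [if_pos h0]
    exact (hB0 _ (by omega)).symm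
  · show (if sequence.toList.length = 0 then sequence else _) = _
    rw [if_neg h0]
    obtain ⟨il, _, ig⟩ := fold_inv sequence.toList sequence.toList.length rfl (by omega)
      (sequence.toList.length - 1) (by omega)
    show (if 0 < (PySem.List.pyGet? (List.foldl (kmpStep sequence.toList)
            (List.replicate sequence.toList.length 0, 0)
            (List.range' 1 (sequence.toList.length - 1))).1 (-1)).getD 0 ∧
          (PySem.List.pyGet? (List.foldl (kmpStep sequence.toList)
            (List.replicate sequence.toList.length 0, 0)
            (List.range' 1 (sequence.toList.length - 1))).1 (-1)).getD 0 < sequence.toList.length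
        then _ else _) = _
    set st := List.foldl (kmpStep sequence.toList) (List.replicate sequence.toList.length 0, 0)
      (List.range' 1 (sequence.toList.length - 1)) with hst
    have hborder : (PySem.List.pyGet? st.1 (-1)).getD 0 = mB sequence.toList := by
      rw [PySem.List.pyGet?_neg_one, List.getLast?_eq_getElem?, il]
      have h2 := ig (sequence.toList.length - 1) (by omega)
      rw [show sequence.toList.length - 1 + 1 = sequence.toList.length from by omega,
          List.take_length] at h2
      simpa [List.getD] using h2
    rw [hborder]
    show _ = (match findDown sequence.toList sequence.toList.length (sequence.toList.length - 1) with
      | some k => String.mk (PySem.List.slice sequence.toList none (some (-(k:Int))))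
      | none => sequence)
    rw [findDown_eq sequence.toList,
        show mBAux sequence.toList (sequence.toList.length - 1) = mB sequence.toList from rfl]
    by_cases hz : mB sequence.toList = 0
    · rw [if_neg (by omega), if_pos hz]
    · have hlt := mB_lt sequence.toList (by omega)
      rw [if_pos ⟨by omega, hlt⟩, if_neg hz]
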